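-- pv_equiv track=rewrite | github.com/Kauefranca/Resolucao-de-problemas-de-grafos | 04 - Edmonds-Karp/main.py | verificar_emparelhamento
-- ===== SOURCE A (Python) =====
-- def verificar_emparelhamento(esquerda, direita, arestas, emparelhamento):
--     usados_esquerda = set()
--     usados_direita = set()
--     for u, v in emparelhamento:
--         if u in usados_esquerda or v in usados_direita:
--             return False
--         if (u, v) not in arestas:
--             return False
--         usados_esquerda.add(u)
--         usados_direita.add(v)
--     return len(emparelhamento) == min(len(esquerda), len(direita)) or all(u in usados_esquerda for u in esquerda) or all(v in usados_direita for v in direita)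
-- ===== SOURCE B (Python) =====
-- def verificar_emparelhamento(esquerda, direita, arestas, emparelhamento):
--     # sort-then-scan: a repeated endpoint shows up as two equal neighbours
--     lefts = sorted(u for u, v in emparelhamento)
--     rights = sorted(v for u, v in emparelhamento)
--     if any(a == b for a, b in zip(lefts, lefts[1:])):
--         return False
--     if any(a == b for a, b in zip(rights, rights[1:])):
--         return False
--     if any(e not in arestas for e in emparelhamento):
--         return False
--     return (len(emparelhamento) == min(len(esquerda), len(direita))
--             or set(esquerda) <= set(lefts)
--             or set(direita) <= set(rights))
-- ===== Notes on version B (the rewrite author's own statement) =====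
-- stated objective: alternative
-- what changed: Replaces A's single early-exiting pass with two interleaved mutable 'used' hash sets by a sort-then-scan algorithm: sort each endpoint projection and detect vertex re-use as equal adjacent elements, check edge membership in a separate pass, and decide maximality via set-subset tests.
import Mathlib
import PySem

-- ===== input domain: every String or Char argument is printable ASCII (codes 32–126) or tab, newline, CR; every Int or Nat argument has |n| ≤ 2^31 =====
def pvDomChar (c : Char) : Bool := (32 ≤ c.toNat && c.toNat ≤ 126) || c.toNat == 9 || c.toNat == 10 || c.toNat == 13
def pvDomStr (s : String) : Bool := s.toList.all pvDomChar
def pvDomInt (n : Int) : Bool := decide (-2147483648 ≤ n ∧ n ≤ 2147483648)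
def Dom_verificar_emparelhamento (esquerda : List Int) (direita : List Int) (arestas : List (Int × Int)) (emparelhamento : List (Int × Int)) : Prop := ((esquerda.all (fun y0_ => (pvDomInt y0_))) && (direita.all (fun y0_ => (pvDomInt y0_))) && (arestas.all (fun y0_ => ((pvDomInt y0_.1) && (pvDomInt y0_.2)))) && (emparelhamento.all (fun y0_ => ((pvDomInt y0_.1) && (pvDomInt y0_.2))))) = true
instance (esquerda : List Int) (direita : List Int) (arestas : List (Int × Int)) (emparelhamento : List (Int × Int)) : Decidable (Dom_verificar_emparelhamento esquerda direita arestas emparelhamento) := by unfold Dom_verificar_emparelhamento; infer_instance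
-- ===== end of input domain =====

-- B replaces A's early-exiting loop with a sort-then-scan algorithm: duplicate endpoints
-- are found as equal adjacent elements of the sorted projections, edge membership is a
-- separate pass, and maximality is decided by set-subset tests (same results as A).

-- ===== PORT A =====
-- literal port of A's for-loop: early return False, two growing 'used' sets,
-- then the maximality disjunction over the final sets
def verEmpLoop (esquerda direita : List Int) (arestas : List (Int × Int))
    (empFull : List (Int × Int)) (emp : List (Int × Int))
    (ue ud : PySem.Set Int) : Bool :=
  match emp with
  | [] =>
      (empFull.length == min esquerda.length direita.length)
      || esquerda.all (fun u => PySem.Set.contains ue u)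
      || direita.all (fun v => PySem.Set.contains ud v)
  | (u, v) :: rest =>
      if PySem.Set.contains ue u || PySem.Set.contains ud v then false
      else if !(arestas.contains (u, v)) then false
      else verEmpLoop esquerda direita arestas empFull rest (PySem.Set.add ue u) (PySem.Set.add ud v)

def verificar_emparelhamento (esquerda : List Int) (direita : List Int) (arestas : List (Int × Int)) (emparelhamento : List (Int × Int)) : Bool :=
  verEmpLoop esquerda direita arestas emparelhamento emparelhamento PySem.Set.empty PySem.Set.empty

-- ===== PORT B =====
-- lefts[1:] of a list is its tail, so zip(lefts, lefts[1:]) is lefts.zip lefts.tail (exact)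
def verificar_emparelhamento_alt (esquerda : List Int) (direita : List Int) (arestas : List (Int × Int)) (emparelhamento : List (Int × Int)) : Bool :=
  let lefts := PySem.List.sorted (emparelhamento.map (fun p => p.1)) (fun x => x) false
  let rights := PySem.List.sorted (emparelhamento.map (fun p => p.2)) (fun x => x) false
  if (lefts.zip lefts.tail).any (fun p => p.1 == p.2) then false
  else if (rights.zip rights.tail).any (fun p => p.1 == p.2) then false
  else if emparelhamento.any (fun e => !(arestas.contains e)) then false
  else (emparelhamento.length == min esquerda.length direita.length)
    || PySem.Set.issubset (PySem.Set.ofList esquerda) (PySem.Set.ofList lefts)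
    || PySem.Set.issubset (PySem.Set.ofList direita) (PySem.Set.ofList rights)

-- ===== PRECONDITION & SPEC =====
def Spec_verificar_emparelhamento (esquerda : List Int) (direita : List Int) (arestas : List (Int × Int)) (emparelhamento : List (Int × Int)) (out : Bool) : Prop := out = verificar_emparelhamento_alt esquerda direita arestas emparelhamento
instance (esquerda : List Int) (direita : List Int) (arestas : List (Int × Int)) (emparelhamento : List (Int × Int)) (out : Bool) : Decidable (Spec_verificar_emparelhamento esquerda direita arestas emparelhamento out) := by unfold Spec_verificar_emparelhamento; infer_instance

-- ===== CLAIM (what is proved, stated in full; the proofs are below) =====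
def Claim_equal_verificar_emparelhamento : Prop := ∀ (esquerda : List Int) (direita : List Int) (arestas : List (Int × Int)) (emparelhamento : List (Int × Int)), Dom_verificar_emparelhamento esquerda direita arestas emparelhamento → Spec_verificar_emparelhamento esquerda direita arestas emparelhamento (verificar_emparelhamento esquerda direita arestas emparelhamento)

-- ===== LEMMAS AND PROOFS =====

-- "the elements of xs are pairwise distinct and none is already in s",
-- computed exactly the way A's loop consumes each side
def pvFresh (xs : List Int) (s : PySem.Set Int) : Bool :=
  match xs with
  | [] => true
  | x :: r => !(PySem.Set.contains s x) && pvFresh r (PySem.Set.add s x)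

theorem verEmpLoop_split (esquerda direita : List Int) (arestas : List (Int × Int))
    (empFull : List (Int × Int)) :
    ∀ (emp : List (Int × Int)) (ue ud : PySem.Set Int),
    verEmpLoop esquerda direita arestas empFull emp ue ud =
      ((pvFresh (emp.map (fun p => p.1)) ue
        && pvFresh (emp.map (fun p => p.2)) ud
        && emp.all (fun p => arestas.contains p))
       &&
       ((empFull.length == min esquerda.length direita.length)
        || esquerda.all (fun u => PySem.Set.contains (PySem.Set.update ue (emp.map (fun p => p.1))) u)
        || direita.all (fun v => PySem.Set.contains (PySem.Set.update ud (emp.map (fun p => p.2))) v))) := by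
  intro emp
  induction emp with
  | nil =>
      intro ue ud
      simp [verEmpLoop, pvFresh, PySem.Set.update]
  | cons hd rest ih =>
      intro ue ud
      obtain ⟨u, v⟩ := hd
      by_cases hu : u ∈ ue
      · simp [verEmpLoop, pvFresh, hu]
      · by_cases hv : v ∈ ud
        · simp [verEmpLoop, pvFresh, hu, hv]
        · by_cases he : (u, v) ∈ arestas
          · simp only [verEmpLoop, List.map_cons, List.all_cons, pvFresh,
              PySem.Set.update_cons, ih]
            simp [hu, hv, he, Bool.and_assoc, Bool.and_comm, Bool.and_left_comm]
          · simp [verEmpLoop, pvFresh, hu, hv, he]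

theorem pvFresh_empty_eq_nodup (xs : List Int) :
    pvFresh xs PySem.Set.empty = decide xs.Nodup := by
  have gen : ∀ (xs : List Int) (s : PySem.Set Int),
      pvFresh xs s = decide (xs.Nodup ∧ ∀ x ∈ xs, x ∉ s) := by
    intro xs
    induction xs with
    | nil => intro s; simp [pvFresh]
    | cons x r ih =>
        intro s
        simp only [pvFresh, ih]
        by_cases hx : x ∈ s
        · have hc : PySem.Set.contains s x = true := (PySem.Set.contains_iff s x).mpr hx
          simp [hx]
        · have hc : PySem.Set.contains s x = false := by
            rcases Bool.eq_false_or_eq_true (PySem.Set.contains s x) with h | h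
            · exact absurd ((PySem.Set.contains_iff s x).mp h) hx
            · exact h
          simp only [hc, Bool.not_false, Bool.true_and, decide_eq_decide]
          constructor
          · rintro ⟨hn, hall⟩
            have hxr : x ∉ r := fun h => (hall x h) ((PySem.Set.mem_add s x x).mpr (Or.inr rfl))
            refine ⟨List.nodup_cons.mpr ⟨hxr, hn⟩, ?_⟩
            intro y hy
            rcases List.mem_cons.mp hy with h | h
            · exact h ▸ hx
            · exact fun hs => (hall y h) ((PySem.Set.mem_add s x y).mpr (Or.inl hs))
          · rintro ⟨hn, hall⟩
            obtain ⟨hxr, hn'⟩ := List.nodup_cons.mp hn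
            refine ⟨hn', fun y hy hmem => ?_⟩
            rcases (PySem.Set.mem_add s x y).mp hmem with hs | h
            · exact hall y (List.mem_cons.mpr (Or.inr hy)) hs
            · exact hxr (h ▸ hy)
  rw [gen]
  simp [PySem.Set.empty]

-- in a ≤-sorted list a duplicate shows up exactly as two equal neighbours
theorem adjEq_of_pairwise (l : List Int) (hp : l.Pairwise (· ≤ ·)) :
    ((l.zip l.tail).any (fun p => p.1 == p.2)) = !decide l.Nodup := by
  induction l with
  | nil => simp
  | cons a t ih =>
      cases t with
      | nil => simp
      | cons b t2 =>
          obtain ⟨h1, hp2⟩ := List.pairwise_cons.mp hp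
          obtain ⟨h2, _⟩ := List.pairwise_cons.mp hp2
          by_cases hab : a = b
          · subst hab
            simp [List.nodup_cons]
          · have hmem : a ∉ b :: t2 := by
              intro hm
              rcases List.mem_cons.mp hm with h | h
              · exact hab h
              · have hab' : a ≤ b := h1 b List.mem_cons_self
                have hbx : b ≤ a := h2 a h
                exact hab (le_antisymm hab' hbx)
            have hrec := ih hp2
            simp only [List.zip, List.tail_cons] at hrec ⊢
            simp [hab, hrec, List.nodup_cons, hmem]

-- the adjacent-equality scan over sorted(xs) decides Nodup xs
theorem adjEq_sorted (xs : List Int) :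
    (((PySem.List.sorted xs (fun x => x) false).zip
        (PySem.List.sorted xs (fun x => x) false).tail).any (fun p => p.1 == p.2))
      = !decide xs.Nodup := by
  have hp : (PySem.List.sorted xs (fun x => x) false).Pairwise (fun a b => a ≤ b) :=
    PySem.List.sorted_pairwise xs (fun x => x)
  rw [adjEq_of_pairwise _ hp]
  have hiff : (PySem.List.sorted xs (fun x => x) false).Nodup ↔ xs.Nodup :=
    (PySem.List.sorted_perm xs (fun x => x) false).nodup_iff
  simp [hiff]

theorem contains_update_empty (xs : List Int) (u : Int) :
    PySem.Set.contains (PySem.Set.update PySem.Set.empty xs) u = xs.contains u := by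
  rw [show (PySem.Set.empty : PySem.Set Int) = [] from rfl, PySem.Set.update_nil_left]
  simp [PySem.Set.mem_ofList]

-- set(ys) <= set(sorted(xs))  =  all(u in xs for u in ys)
theorem issubset_ofList_sorted (ys xs : List Int) :
    PySem.Set.issubset (PySem.Set.ofList ys)
      (PySem.Set.ofList (PySem.List.sorted xs (fun x => x) false))
      = ys.all (fun u => xs.contains u) := by
  by_cases hall : ∀ u ∈ ys, u ∈ xs
  · have h1 : PySem.Set.issubset (PySem.Set.ofList ys)
        (PySem.Set.ofList (PySem.List.sorted xs (fun x => x) false)) = true :=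
      (PySem.Set.issubset_iff _ _).mpr (fun u hu =>
        (PySem.Set.mem_ofList _ u).mpr ((PySem.List.mem_sorted _ _ _ _).mpr
          (hall u ((PySem.Set.mem_ofList ys u).mp hu))))
    have h2 : ys.all (fun u => xs.contains u) = true :=
      List.all_eq_true.mpr (fun u hu => by simp [hall u hu])
    rw [h1, h2]
  · have h2 : ys.all (fun u => xs.contains u) = false := by
      rw [List.all_eq_false]
      rw [not_forall] at hall
      simp only [not_forall, exists_prop] at hall
      obtain ⟨u, hu, hnx⟩ := hall
      exact ⟨u, hu, by simp [hnx]⟩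
    rw [h2]
    cases hx : PySem.Set.issubset (PySem.Set.ofList ys)
        (PySem.Set.ofList (PySem.List.sorted xs (fun x => x) false)) with
    | false => rfl
    | true =>
        exact absurd (fun u hu => (PySem.List.mem_sorted _ _ _ _).mp
          ((PySem.Set.mem_ofList _ u).mp ((PySem.Set.issubset_iff _ _).mp hx u
            ((PySem.Set.mem_ofList ys u).mpr hu)))) hall

-- ===== VERDICT (by name: the statement is the Claim_ definition above) =====
theorem verificar_emparelhamento_spec : Claim_equal_verificar_emparelhamento := by
  intro esquerda direita arestas emparelhamento _
  unfold Spec_verificar_emparelhamento verificar_emparelhamento verificar_emparelhamento_alt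
  rw [verEmpLoop_split]
  simp only [pvFresh_empty_eq_nodup, contains_update_empty, adjEq_sorted,
    issubset_ofList_sorted]
  by_cases hL : (emparelhamento.map (fun p => p.1)).Nodup <;>
    by_cases hR : (emparelhamento.map (fun p => p.2)).Nodup <;>
      rcases Bool.eq_false_or_eq_true (emparelhamento.all (fun p => arestas.contains p)) with hA | hA <;>
        simp_all [List.any_eq_not_all_not]
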